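-- pv_equiv track=rewrite | github.com/prajwalendra/mcp | src/openapi-mcp-server/awslabs/openapi_mcp_server/prompts/operation_instructions.py | generate_operations_index
-- ===== SOURCE A (Python) =====
-- from typing import Any, Dict, List, Tuple
--
-- def generate_operations_index(api_name: str, operation_prompts: List[Tuple[str, str, str]]) -> str:
--     """Generate an index of all operation prompts.
--
--     Args:
--         api_name: The name of the API
--         operation_prompts: List of (prompt_name, operation_id, resource) tuples
--
--     Returns:
--         str: An index of all operation prompts
--     """
--     content = [f'# {api_name} API Operations\n']
--     content.append('This is an index of all available operation guides for this API.\n')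
--     content.append('## Available Operation Guides\n')
--
--     # Group operations by resource/entity
--     grouped_operations = {}
--     for prompt_name, operation_id, resource in operation_prompts:
--         if resource not in grouped_operations:
--             grouped_operations[resource] = []
--
--         grouped_operations[resource].append((prompt_name, operation_id))
--
--     # Add grouped operations to content
--     for resource, operations in sorted(grouped_operations.items()):
--         content.append(f'### {resource}\n')
--         for prompt_name, operation_id in sorted(operations, key=lambda x: x[1]):
--             content.append(f'- {operation_id}: Use prompt `{prompt_name}`')
--         content.append('')
--
--     content.append('## How to Use\n')
--     content.append(
--         'To get detailed information about a specific operation, request the corresponding prompt by name.'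
--     )
--     content.append(
--         f"For example, to learn about the 'getPet' operation, request the '{api_name}_getPet_guide' prompt.\n"
--     )
--
--     return '\n'.join(content)
-- ===== SOURCE B (Python) =====
-- from typing import List, Tuple
--
--
-- def generate_operations_index(api_name: str, operation_prompts: List[Tuple[str, str, str]]) -> str:
--     """Single stable sort by (resource, operation_id), then one linear pass that
--     emits each resource section as the sorted list is walked (no dict grouping)."""
--     content = [
--         f'# {api_name} API Operations\n',
--         'This is an index of all available operation guides for this API.\n',
--         '## Available Operation Guides\n',
--     ]
--     current = None
--     for prompt_name, operation_id, resource in sorted(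
--         operation_prompts, key=lambda t: (t[2], t[1])
--     ):
--         if resource != current:
--             if current is not None:
--                 content.append('')
--             content.append(f'### {resource}\n')
--             current = resource
--         content.append(f'- {operation_id}: Use prompt `{prompt_name}`')
--     if current is not None:
--         content.append('')
--     content.append('## How to Use\n')
--     content.append(
--         'To get detailed information about a specific operation, request the corresponding prompt by name.'
--     )
--     content.append(
--         f"For example, to learn about the 'getPet' operation, request the '{api_name}_getPet_guide' prompt.\n"
--     )
--     return '\n'.join(content)
-- ===== Notes on version B (the rewrite author's own statement) =====
-- stated objective: alternative
-- what changed: Replaces A's group-into-dict-then-sort-each-group with one stable sort of the whole list by (resource, operation_id) followed by a single linear pass that emits a section header whenever the resource changes.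
import Mathlib
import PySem

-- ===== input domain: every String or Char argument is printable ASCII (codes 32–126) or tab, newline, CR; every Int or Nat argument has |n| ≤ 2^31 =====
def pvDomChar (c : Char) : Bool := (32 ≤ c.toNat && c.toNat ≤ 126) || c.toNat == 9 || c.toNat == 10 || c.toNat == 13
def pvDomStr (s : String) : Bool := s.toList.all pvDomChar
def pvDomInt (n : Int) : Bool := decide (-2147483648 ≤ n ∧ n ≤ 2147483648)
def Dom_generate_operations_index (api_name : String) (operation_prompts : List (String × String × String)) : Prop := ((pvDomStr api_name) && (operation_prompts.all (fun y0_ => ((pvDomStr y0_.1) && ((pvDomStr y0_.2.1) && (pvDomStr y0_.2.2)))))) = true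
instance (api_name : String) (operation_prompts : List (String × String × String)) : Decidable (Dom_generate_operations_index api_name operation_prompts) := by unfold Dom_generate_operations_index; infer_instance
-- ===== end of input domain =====

-- B replaces A's dict-grouping + per-group sort by ONE stable sort on (resource, operation_id)
-- and a single linear pass emitting a section whenever the resource changes (alternative
-- decomposition, same cost).

-- shared f-string transliterations (the literal format strings of both Pythons)
def pvHeadLines (api_name : String) : List String :=
  ["# " ++ api_name ++ " API Operations\n",
   "This is an index of all available operation guides for this API.\n",
   "## Available Operation Guides\n"]
def pvFootLines (api_name : String) : List String :=
  ["## How to Use\n",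
   "To get detailed information about a specific operation, request the corresponding prompt by name.",
   "For example, to learn about the 'getPet' operation, request the '" ++ api_name ++ "_getPet_guide' prompt.\n"]
def pvHdr (k : String) : String := "### " ++ k ++ "\n"
def pvPairLine (x : String × String) : String := "- " ++ x.2 ++ ": Use prompt `" ++ x.1 ++ "`"
def pvLine (t : String × String × String) : String := "- " ++ t.2.1 ++ ": Use prompt `" ++ t.1 ++ "`"

-- ===== PORT A =====
def generate_operations_index (api_name : String) (operation_prompts : List (String × String × String)) : String :=
  let content0 : List String := pvHeadLines api_name
  -- 'if resource not in grouped: grouped[resource] = []' then 'grouped[resource].append(...)'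
  let grouped : PySem.Dict String (List (String × String)) :=
    operation_prompts.foldl (fun d t =>
      let d' := if d.contains t.2.2 then d else d.insert t.2.2 []
      d'.modify t.2.2 [] (fun l => l ++ [(t.1, t.2.1)])) PySem.Dict.empty
  -- sorted(grouped.items()): dict keys are distinct, so Python's tuple comparison never
  -- reaches the second component — ported with key = fst (exact).
  let content1 := (PySem.List.sorted grouped.items (fun p => p.1) false).foldl
    (fun c p =>
      let c1 := c ++ [pvHdr p.1]
      let c2 := (PySem.List.sorted p.2 (fun x => x.2) false).foldl
        (fun c x => c ++ [pvPairLine x]) c1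
      c2 ++ [""]) content0
  PySem.Str.join "\n" (content1 ++ pvFootLines api_name)

-- ===== PORT B =====
-- loop body of Source B's single pass (state: content list × current resource)
def pvBStep (s : List String × Option String) (t : String × String × String) :
    List String × Option String :=
  let s1 := if some t.2.2 ≠ s.2 then
      ((if s.2 = none then s.1 else s.1 ++ [""]) ++ [pvHdr t.2.2], some t.2.2)
    else s
  (s1.1 ++ [pvLine t], s1.2)

def generate_operations_index_alt (api_name : String) (operation_prompts : List (String × String × String)) : String :=
  let st := (PySem.List.sorted2 operation_prompts (fun t => t.2.2) (fun t => t.2.1) false).foldl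
    pvBStep (pvHeadLines api_name, none)
  let content1 := if st.2 = none then st.1 else st.1 ++ [""]
  PySem.Str.join "\n" (content1 ++ pvFootLines api_name)

-- ===== PRECONDITION & SPEC =====
def Spec_generate_operations_index (api_name : String) (operation_prompts : List (String × String × String)) (out : String) : Prop := out = generate_operations_index_alt api_name operation_prompts
instance (api_name : String) (operation_prompts : List (String × String × String)) (out : String) : Decidable (Spec_generate_operations_index api_name operation_prompts out) := by unfold Spec_generate_operations_index; infer_instance

-- ===== CLAIM (what is proved, stated in full; the proofs are below) =====
def Claim_equal_generate_operations_index : Prop := ∀ (api_name : String) (operation_prompts : List (String × String × String)), Dom_generate_operations_index api_name operation_prompts → Spec_generate_operations_index api_name operation_prompts (generate_operations_index api_name operation_prompts)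

-- ===== LEMMAS AND PROOFS =====

-- abbreviations used only by the proofs
def pvBt (a b : String × String × String) : Bool :=
  decide (a.2.2 < b.2.2) || (!decide (b.2.2 < a.2.2) && decide (a.2.1 < b.2.1))
def pvBt' (a b : String × String × String) : Bool := decide (a.2.1 < b.2.1)
def pvLexLe (a b : String × String × String) : Prop :=
  a.2.2 < b.2.2 ∨ (a.2.2 = b.2.2 ∧ a.2.1 ≤ b.2.1)
def pvLexLt (a b : String × String × String) : Prop :=
  a.2.2 < b.2.2 ∨ (a.2.2 = b.2.2 ∧ a.2.1 < b.2.1)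
def pvKeys (l : List (String × String × String)) : List String :=
  PySem.List.sorted (PySem.Set.ofList (l.map (fun t => t.2.2))) (fun x => x) false
def pvRun (l : List (String × String × String)) (k : String) : List (String × String × String) :=
  PySem.List.sorted (l.filter (fun t => t.2.2 == k)) (fun t => t.2.1) false
def pvBlock (l : List (String × String × String)) (k : String) : List String :=
  pvHdr k :: (pvRun l k).map pvLine ++ [""]
-- output of B's pass over the runs of a key list, given the current resource
def pvEmit (l : List (String × String × String)) : Option String → List String → List String
  | _, [] => []
  | cur, k :: ks =>
    (if cur = none then [] else [""]) ++ pvHdr k :: (pvRun l k).map pvLine ++ pvEmit l (some k) ks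

theorem pvInsertBy_nil {α : Type} (b : α → α → Bool)
    (x : α) : PySem.List.insertBy b x [] = [x] := rfl

theorem pvInsertBy_cons {α : Type} (b : α → α → Bool)
    (x y : α) (ys : List α) :
    PySem.List.insertBy b x (y :: ys) =
      if b x y then x :: y :: ys else y :: PySem.List.insertBy b x ys := rfl

theorem pvBt_iff (a b : String × String × String) : pvBt a b = true ↔ pvLexLt a b := by
  unfold pvBt pvLexLt
  simp only [Bool.or_eq_true, Bool.and_eq_true, Bool.not_eq_true', decide_eq_true_eq,
    decide_eq_false_iff_not]
  constructor
  · rintro (h | ⟨hn, hl⟩)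
    · exact Or.inl h
    · rcases lt_trichotomy a.2.2 b.2.2 with h | h | h
      · exact Or.inl h
      · exact Or.inr ⟨h, hl⟩
      · exact absurd h hn
  · rintro (h | ⟨he, hl⟩)
    · exact Or.inl h
    · exact Or.inr ⟨by rw [he]; exact lt_irrefl _, hl⟩

theorem pvLexLe_total (a b : String × String × String) : pvLexLe a b ∨ pvLexLe b a := by
  unfold pvLexLe
  rcases lt_trichotomy a.2.2 b.2.2 with h | h | h
  · exact Or.inl (Or.inl h)
  · rcases le_total a.2.1 b.2.1 with h2 | h2
    · exact Or.inl (Or.inr ⟨h, h2⟩)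
    · exact Or.inr (Or.inr ⟨h.symm, h2⟩)
  · exact Or.inr (Or.inl h)

theorem pvLexLt_le {a b : String × String × String} (h : pvLexLt a b) : pvLexLe a b := by
  unfold pvLexLt pvLexLe at *
  rcases h with h | ⟨e, h⟩
  · exact Or.inl h
  · exact Or.inr ⟨e, le_of_lt h⟩

theorem pvLexLt_of_lt_of_le {a b c : String × String × String} (h1 : pvLexLt a b) (h2 : pvLexLe b c) : pvLexLt a c := by
  unfold pvLexLt pvLexLe at *
  rcases h1 with h1 | ⟨e1, l1⟩ <;> rcases h2 with h2 | ⟨e2, l2⟩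
  · exact Or.inl (lt_trans h1 h2)
  · exact Or.inl (e2 ▸ h1)
  · exact Or.inl (e1 ▸ h2)
  · exact Or.inr ⟨e1.trans e2, lt_of_lt_of_le l1 l2⟩

theorem pvLexLe_of_not_lt {x y : String × String × String} (h : ¬ pvLexLt x y) : pvLexLe y x := by
  rcases pvLexLe_total y x with h2 | h2
  · exact h2
  · unfold pvLexLe at h2
    unfold pvLexLt pvLexLe at *
    rcases h2 with h2 | ⟨e, l⟩
    · exact absurd (Or.inl h2) h
    · rcases lt_or_eq_of_le l with l' | l'
      · exact absurd (Or.inr ⟨e, l'⟩) h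
      · exact Or.inr ⟨e.symm, le_of_eq l'.symm⟩

theorem pvInsertBy_front {α : Type} (b : α → α → Bool)
    (x : α) (zs : List α)
    (h : ∀ z ∈ zs, b x z = true) : PySem.List.insertBy b x zs = x :: zs := by
  cases zs with
  | nil => rfl
  | cons z zs => rw [pvInsertBy_cons, if_pos (h z (List.mem_cons_self))]

theorem pvPairwise_insertBy (x : String × String × String) (acc : List (String × String × String))
    (h : acc.Pairwise pvLexLe) : (PySem.List.insertBy pvBt x acc).Pairwise pvLexLe := by
  induction acc with
  | nil => simp [pvInsertBy_nil]
  | cons y ys ih =>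
    rw [pvInsertBy_cons]
    rcases List.pairwise_cons.1 h with ⟨hy, hys⟩
    by_cases hb : pvBt x y = true
    · rw [if_pos hb]
      have hxy : pvLexLt x y := (pvBt_iff x y).1 hb
      refine List.pairwise_cons.2 ⟨?_, h⟩
      intro z hz
      rcases List.mem_cons.1 hz with rfl | hz
      · exact pvLexLt_le hxy
      · exact pvLexLt_le (pvLexLt_of_lt_of_le hxy (hy z hz))
    · rw [if_neg hb]
      have hyx : pvLexLe y x := pvLexLe_of_not_lt (fun hl => hb ((pvBt_iff x y).2 hl))
      refine List.pairwise_cons.2 ⟨?_, ih hys⟩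
      intro z hz
      rcases (PySem.List.mem_insertBy _ _ _ _).1 hz with rfl | hz
      · exact hyx
      · exact hy z hz

theorem pvSorted2_pairwise (l : List (String × String × String)) :
    (PySem.List.sorted2 l (fun t => t.2.2) (fun t => t.2.1) false).Pairwise pvLexLe := by
  have key : ∀ (m : List (String × String × String)) (acc : List (String × String × String)),
      acc.Pairwise pvLexLe →
      (m.foldl (fun a x => PySem.List.insertBy pvBt x a) acc).Pairwise pvLexLe := by
    intro m
    induction m with
    | nil => intro acc h; exact h
    | cons t m ih =>
      intro acc h
      exact ih _ (pvPairwise_insertBy t acc h)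
  exact key l [] List.Pairwise.nil

theorem pvFilter_insertBy (c : String) (x : String × String × String)
    (acc : List (String × String × String)) (h : acc.Pairwise pvLexLe) :
    (PySem.List.insertBy pvBt x acc).filter (fun t => t.2.2 == c) =
      if x.2.2 == c then PySem.List.insertBy pvBt' x (acc.filter (fun t => t.2.2 == c))
      else acc.filter (fun t => t.2.2 == c) := by
  induction acc with
  | nil =>
    by_cases hp : (x.2.2 == c) = true <;>
      simp [pvInsertBy_nil, hp]
  | cons y ys ih =>
    rcases List.pairwise_cons.1 h with ⟨hy, hys⟩
    rw [pvInsertBy_cons]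
    by_cases hb : pvBt x y = true
    · rw [if_pos hb]
      have hxy := (pvBt_iff x y).1 hb
      by_cases hp : (x.2.2 == c) = true
      · have hall : ∀ z ∈ (y :: ys).filter (fun t => t.2.2 == c), pvBt' x z = true := by
          intro z hz
          rcases List.mem_filter.1 hz with ⟨hzm, hzc⟩
          have hlt : pvLexLt x z := by
            rcases List.mem_cons.1 hzm with rfl | hzm
            · exact hxy
            · exact pvLexLt_of_lt_of_le hxy (hy z hzm)
          have ex : x.2.2 = z.2.2 := by
            rw [beq_iff_eq] at hp hzc; rw [hp, hzc]
          unfold pvLexLt at hlt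
          rcases hlt with hlt | ⟨_, hlt⟩
          · rw [ex] at hlt; exact absurd hlt (lt_irrefl _)
          · exact decide_eq_true hlt
        rw [if_pos hp, List.filter_cons, if_pos hp, pvInsertBy_front _ _ _ hall]
      · rw [if_neg hp, List.filter_cons, if_neg hp]
    · rw [if_neg hb]
      have ih' := ih hys
      by_cases hpx : (x.2.2 == c) = true <;> by_cases hpy : (y.2.2 == c) = true
      · have ex : x.2.2 = y.2.2 := by rw [beq_iff_eq] at hpx hpy; rw [hpx, hpy]
        have hbq : pvBt x y = pvBt' x y := by
          unfold pvBt pvBt'; rw [ex]; simp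
        have hb2 : pvBt' x y = false := by
          rw [← hbq]; exact Bool.eq_false_iff.mpr hb
        simp [hpx, hpy, ih', pvInsertBy_cons, hb2]
      · simp [hpx, hpy, ih']
      · simp [hpx, hpy, ih']
      · simp [hpx, hpy, ih']

theorem pvFilter_sorted2 (l : List (String × String × String)) (c : String) :
    (PySem.List.sorted2 l (fun t => t.2.2) (fun t => t.2.1) false).filter (fun t => t.2.2 == c)
      = pvRun l c := by
  have key : ∀ (m acc : List (String × String × String)), acc.Pairwise pvLexLe →
      (m.foldl (fun a x => PySem.List.insertBy pvBt x a) acc).filter (fun t => t.2.2 == c)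
        = m.foldl (fun a x => if (x.2.2 == c) = true then PySem.List.insertBy pvBt' x a else a)
            (acc.filter (fun t => t.2.2 == c)) := by
    intro m
    induction m with
    | nil => intro acc h; rfl
    | cons t m ih =>
      intro acc h
      rw [List.foldl_cons, List.foldl_cons, ih _ (pvPairwise_insertBy t acc h),
        pvFilter_insertBy c t acc h]
  have e := key l [] List.Pairwise.nil
  rw [List.filter_nil] at e
  have e2 : (PySem.List.sorted2 l (fun t => t.2.2) (fun t => t.2.1) false).filter (fun t => t.2.2 == c)
      = (l.foldl (fun a x => PySem.List.insertBy pvBt x a) []).filter (fun t => t.2.2 == c) := rfl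
  rw [e2, e, PySem.List.foldl_if_eq_foldl_filter (fun t => t.2.2 == c)
    (fun a x => PySem.List.insertBy pvBt' x a)]
  rfl

theorem pvMap_sorted (lf : List (String × String × String)) :
    PySem.List.sorted (lf.map (fun t => (t.1, t.2.1))) (fun x => x.2) false
      = (PySem.List.sorted lf (fun t => t.2.1) false).map (fun t => (t.1, t.2.1)) := by
  have mapins : ∀ (t : String × String × String) (acc : List (String × String × String)),
      PySem.List.insertBy (fun a b : String × String => decide (a.2 < b.2)) (t.1, t.2.1)
          (acc.map (fun t => (t.1, t.2.1)))
        = (PySem.List.insertBy pvBt' t acc).map (fun t => (t.1, t.2.1)) := by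
    intro t acc
    induction acc with
    | nil => rfl
    | cons y ys ih =>
      rw [List.map_cons, pvInsertBy_cons, pvInsertBy_cons]
      have hc1 : decide ((t.1, t.2.1).2 < (y.1, y.2.1).2) = pvBt' t y := rfl
      rw [hc1]
      by_cases hb : pvBt' t y = true
      · rw [if_pos hb, if_pos hb]
        rfl
      · rw [if_neg hb, if_neg hb, List.map_cons, ih]
  have key : ∀ (m acc : List (String × String × String)),
      m.foldl (fun a t => PySem.List.insertBy (fun a b : String × String => decide (a.2 < b.2))
          (t.1, t.2.1) a) (acc.map (fun t => (t.1, t.2.1)))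
        = (m.foldl (fun a t => PySem.List.insertBy pvBt' t a) acc).map (fun t => (t.1, t.2.1)) := by
    intro m
    induction m with
    | nil => intro acc; rfl
    | cons t m ih =>
      intro acc
      rw [List.foldl_cons, List.foldl_cons, mapins, ih]
  have e1 : PySem.List.sorted (lf.map (fun t => (t.1, t.2.1))) (fun x => x.2) false
      = (lf.map (fun t => (t.1, t.2.1))).foldl
          (fun a x => PySem.List.insertBy (fun a b : String × String => decide (a.2 < b.2)) x a) [] := rfl
  rw [e1, List.foldl_map]
  have := key lf []
  rw [List.map_nil] at this
  rw [this]
  rfl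

theorem pvStep_eq (d : PySem.Dict String (List (String × String))) (t : String × String × String) :
    (let d' := if d.contains t.2.2 then d else d.insert t.2.2 []
     d'.modify t.2.2 [] (fun g => g ++ [(t.1, t.2.1)]))
    = d.modify t.2.2 [] (fun g => g ++ [(t.1, t.2.1)]) := by
  by_cases hc : d.contains t.2.2 = true
  · simp only [hc, if_true]
  · have hc' : d.contains t.2.2 = false := Bool.eq_false_iff.mpr hc
    simp only [hc', Bool.false_eq_true, if_false]
    unfold PySem.Dict.modify
    rw [PySem.Dict.getD_insert_self]
    have h0 : d.get? t.2.2 = none := (PySem.Dict.get?_eq_none_iff_contains d t.2.2).2 hc'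
    have hga : d.getD t.2.2 [] = [] := by unfold PySem.Dict.getD; rw [h0]; rfl
    rw [hga]
    have hnk : ∀ p ∈ d.items, (p.1 == t.2.2) = false := by
      intro p hp
      by_contra hne
      have : d.items.any (fun p => p.1 == t.2.2) = true :=
        List.any_eq_true.2 ⟨p, hp, Bool.not_eq_false _ ▸ hne⟩
      exact hc this
    apply PySem.Dict.ext
    have hcon : (d.insert t.2.2 []).contains t.2.2 = true := by
      unfold PySem.Dict.contains
      rw [PySem.Dict.items_insert_of_not_contains d [] hc']
      simp
    rw [PySem.Dict.items_insert_of_contains _ _ hcon,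
      PySem.Dict.items_insert_of_not_contains d [] hc',
      PySem.Dict.items_insert_of_not_contains d _ hc',
      List.map_append]
    congr 1
    · have hm : List.map (fun p => if (p.1 == t.2.2) = true
            then (t.2.2, (fun g => g ++ [(t.1, t.2.1)]) []) else p) d.items
          = List.map id d.items :=
        List.map_congr_left (fun p hp => by rw [hnk p hp]; simp)
      rw [hm, List.map_id]
    · simp

theorem pvItems_grouped (l : List (String × String × String)) :
    (l.foldl (fun d t =>
      let d' := if d.contains t.2.2 then d else d.insert t.2.2 []
      d'.modify t.2.2 [] (fun g => g ++ [(t.1, t.2.1)])) (PySem.Dict.empty : PySem.Dict String (List (String × String)))).items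
    = (PySem.Set.ofList (l.map (fun t => t.2.2))).map
        (fun k => (k, (l.filter (fun t => t.2.2 == k)).map (fun t => (t.1, t.2.1)))) := by
  rw [PySem.List.foldl_congr_mem _ _
      (fun d t => d.modify t.2.2 [] (fun g => g ++ [(t.1, t.2.1)])) _
      (fun acc x _ => pvStep_eq acc x)]
  have hkeys : (l.foldl (fun d t => d.modify t.2.2 [] (fun g => g ++ [(t.1, t.2.1)]))
      (PySem.Dict.empty : PySem.Dict String (List (String × String)))).keys
      = PySem.Set.ofList (l.map (fun t => t.2.2)) := by
    rw [PySem.Dict.keys_foldl_modify_key l (fun t => t.2.2) [] (fun _ t g => g ++ [(t.1, t.2.1)])]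
    exact PySem.Set.update_empty _
  have hnd : (l.foldl (fun d t => d.modify t.2.2 [] (fun g => g ++ [(t.1, t.2.1)]))
      (PySem.Dict.empty : PySem.Dict String (List (String × String)))).keys.Nodup := by
    rw [hkeys]; exact PySem.Set.nodup_ofList _
  rw [PySem.Dict.items_eq_map_keys _ hnd [], hkeys]
  apply List.map_congr_left
  intro k _
  congr 1
  have hfold : (l.foldl (fun d t => d.modify t.2.2 [] (fun g => g ++ [(t.1, t.2.1)]))
      (PySem.Dict.empty : PySem.Dict String (List (String × String))))
      = ((l.map (fun t => (t.2.2, (t.1, t.2.1)))).foldl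
          (fun d p => d.modify p.1 [] (fun g => g ++ [p.2])) PySem.Dict.empty) := by
    rw [List.foldl_map]
  rw [hfold, PySem.Dict.getD_foldl_modify_append, List.filter_map, List.map_map]
  rfl

theorem pvSorted_items (l : List (String × String × String)) :
    PySem.List.sorted ((PySem.Set.ofList (l.map (fun t => t.2.2))).map
        (fun k => (k, (l.filter (fun t => t.2.2 == k)).map (fun t => (t.1, t.2.1)))))
      (fun p => p.1) false
    = (pvKeys l).map (fun k => (k, (l.filter (fun t => t.2.2 == k)).map (fun t => (t.1, t.2.1)))) := by
  apply PySem.List.sorted_eq_of_perm_of_pairwise_lt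
  · exact (PySem.List.sorted_perm (PySem.Set.ofList (l.map (fun t => t.2.2))) (fun x => x) false).map _
  · exact List.pairwise_map.2
      ((PySem.List.sorted_ofList_pairwise_lt (l.map (fun t => t.2.2))).imp (fun h => h))

-- A's middle section, after its dict is rewritten to a map over the sorted keys
theorem pvA_mid (l : List (String × String × String)) (ks : List String) (content0 : List String) :
    ((ks.map (fun k => (k, (l.filter (fun t => t.2.2 == k)).map (fun t => (t.1, t.2.1))))).foldl
      (fun c p =>
        let c1 := c ++ [pvHdr p.1]
        let c2 := (PySem.List.sorted p.2 (fun x => x.2) false).foldl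
          (fun c x => c ++ [pvPairLine x]) c1
        c2 ++ [""]) content0)
    = content0 ++ ks.flatMap (pvBlock l) := by
  induction ks generalizing content0 with
  | nil => simp
  | cons k ks ih =>
    rw [List.map_cons, List.foldl_cons, ih, List.flatMap_cons]
    show ((PySem.List.sorted ((l.filter (fun t => t.2.2 == k)).map (fun t => (t.1, t.2.1)))
        (fun x => x.2) false).foldl (fun c x => c ++ [pvPairLine x]) (content0 ++ [pvHdr k])) ++ [""]
        ++ ks.flatMap (pvBlock l)
      = content0 ++ (pvBlock l k ++ ks.flatMap (pvBlock l))
    rw [pvMap_sorted, PySem.List.foldl_append_singleton_eq_map, List.map_map]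
    have hcomp : pvPairLine ∘ (fun t : String × String × String => (t.1, t.2.1)) = pvLine := rfl
    rw [hcomp]
    simp [pvBlock, pvRun, List.append_assoc]

theorem pvLexLe_fst {a b : String × String × String} (h : pvLexLe a b) : a.2.2 ≤ b.2.2 := by
  unfold pvLexLe at h
  rcases h with h | ⟨e, _⟩
  · exact le_of_lt h
  · exact le_of_eq e

theorem pvDiscard_not_mem {s : List String} {a : String} (h : a ∉ s) :
    PySem.Set.discard s a = s := by
  unfold PySem.Set.discard
  exact List.filter_eq_self.2 (fun y hy => by simp; exact fun e => h (e ▸ hy))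

-- clustered reconstruction of a lex-sorted list
theorem pvClustered (ys : List (String × String × String)) (h : ys.Pairwise pvLexLe) :
    ys = (PySem.Set.ofList (ys.map (fun t => t.2.2))).flatMap
      (fun k => ys.filter (fun t => t.2.2 == k)) := by
  induction ys with
  | nil => rfl
  | cons t ts ih =>
    rcases List.pairwise_cons.1 h with ⟨ht, hts⟩
    rw [List.map_cons, PySem.Set.ofList_cons, List.flatMap_cons]
    have hfT : (t :: ts).filter (fun u => u.2.2 == t.2.2)
        = t :: ts.filter (fun u => u.2.2 == t.2.2) := by simp
    have hflat : ((PySem.Set.ofList (ts.map (fun u => u.2.2))).discard t.2.2).flatMap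
          (fun k => (t :: ts).filter (fun u => u.2.2 == k))
        = ((PySem.Set.ofList (ts.map (fun u => u.2.2))).discard t.2.2).flatMap
          (fun k => ts.filter (fun u => u.2.2 == k)) := by
      apply List.flatMap_congr
      intro k hk
      rcases (PySem.Set.mem_discard _ _ _).1 hk with ⟨_, hne⟩
      have hb : (t.2.2 == k) = false := beq_eq_false_iff_ne.2 (fun e => hne e.symm)
      simp [hb]
    rw [hfT, hflat]
    by_cases hmem : t.2.2 ∈ ts.map (fun u => u.2.2)
    · cases ts with
      | nil => simp at hmem
      | cons u ts'' =>
        have hue : u.2.2 = t.2.2 := by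
          rcases List.mem_map.1 hmem with ⟨w, hw, hwe⟩
          rcases List.mem_cons.1 hw with rfl | hw
          · exact hwe
          · have h1 : t.2.2 ≤ u.2.2 := pvLexLe_fst (ht u List.mem_cons_self)
            have h2 : u.2.2 ≤ w.2.2 := pvLexLe_fst ((List.pairwise_cons.1 hts).1 w hw)
            exact le_antisymm (hwe ▸ h2) h1
        have hX : PySem.Set.ofList ((u :: ts'').map (fun v => v.2.2))
            = t.2.2 :: (PySem.Set.ofList (ts''.map (fun v => v.2.2))).discard t.2.2 := by
          rw [List.map_cons, PySem.Set.ofList_cons, hue]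
        have hXd : ((PySem.Set.ofList (ts''.map (fun v => v.2.2))).discard t.2.2).discard t.2.2
            = (PySem.Set.ofList (ts''.map (fun v => v.2.2))).discard t.2.2 :=
          pvDiscard_not_mem (fun hm => ((PySem.Set.mem_discard _ _ _).1 hm).2 rfl)
        have hdX : (PySem.Set.ofList ((u :: ts'').map (fun v => v.2.2))).discard t.2.2
            = (PySem.Set.ofList (ts''.map (fun v => v.2.2))).discard t.2.2 := by
          rw [hX]
          unfold PySem.Set.discard at hXd ⊢
          rw [List.filter_cons]
          simp only [beq_self_eq_true, Bool.not_true, Bool.false_eq_true, if_false]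
          exact hXd
        have ihe := ih hts
        rw [hX, List.flatMap_cons] at ihe
        rw [hdX, List.cons_append]
        exact congrArg (t :: ·) ihe
    · have hfilnil : ts.filter (fun u => u.2.2 == t.2.2) = [] := by
        apply List.filter_eq_nil_iff.2
        intro u hu hb
        exact hmem (List.mem_map.2 ⟨u, hu, (beq_iff_eq.1 hb).symm ▸ rfl⟩)
      have hd : (PySem.Set.ofList (ts.map (fun u => u.2.2))).discard t.2.2
          = PySem.Set.ofList (ts.map (fun u => u.2.2)) :=
        pvDiscard_not_mem (fun hm => hmem ((PySem.Set.mem_ofList _ _).1 hm))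
      rw [hfilnil, hd, List.cons_append, List.nil_append]
      exact congrArg (t :: ·) (ih hts)

theorem pvOfList_pairwise (xs : List String) (h : xs.Pairwise (· ≤ ·)) :
    (PySem.Set.ofList xs).Pairwise (· ≤ ·) := by
  induction xs with
  | nil => exact List.Pairwise.nil
  | cons x xs ih =>
    rcases List.pairwise_cons.1 h with ⟨hx, hxs⟩
    rw [PySem.Set.ofList_cons]
    refine List.pairwise_cons.2 ⟨?_, ?_⟩
    · intro y hy
      exact hx y ((PySem.Set.mem_ofList _ _).1 ((PySem.Set.mem_discard _ _ _).1 hy).1)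
    · exact List.Pairwise.sublist List.filter_sublist (ih hxs)

theorem pvRun_mem {l : List (String × String × String)} {k : String}
    {t : String × String × String} (h : t ∈ pvRun l k) : t.2.2 = k := by
  unfold pvRun at h
  exact beq_iff_eq.1 (List.mem_filter.1 ((PySem.List.mem_sorted _ _ _ _).1 h)).2

theorem pvFoldlLast_ne_none (ks : List String) (k0 : String) :
    ks.foldl (fun _ k => some k) (some k0) ≠ none := by
  induction ks generalizing k0 with
  | nil => simp
  | cons k ks ih => exact ih k

theorem pvKeys_of_sorted2 (l : List (String × String × String)) :
    PySem.Set.ofList ((PySem.List.sorted2 l (fun t => t.2.2) (fun t => t.2.1) false).map (fun t => t.2.2))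
      = pvKeys l := by
  have hperm : (PySem.Set.ofList ((PySem.List.sorted2 l (fun t => t.2.2) (fun t => t.2.1) false).map
      (fun t => t.2.2))).Perm (PySem.Set.ofList (l.map (fun t => t.2.2))) := by
    rw [List.perm_ext_iff_of_nodup (PySem.Set.nodup_ofList _) (PySem.Set.nodup_ofList _)]
    intro a
    rw [PySem.Set.mem_ofList, PySem.Set.mem_ofList]
    exact ((PySem.List.sorted2_perm l (fun t => t.2.2) (fun t => t.2.1) false).map
      (fun t => t.2.2)).mem_iff
  have hle : ((PySem.List.sorted2 l (fun t => t.2.2) (fun t => t.2.1) false).map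
      (fun t => t.2.2)).Pairwise (· ≤ ·) :=
    List.pairwise_map.2 ((pvSorted2_pairwise l).imp pvLexLe_fst)
  have hpw : (PySem.Set.ofList ((PySem.List.sorted2 l (fun t => t.2.2) (fun t => t.2.1) false).map
      (fun t => t.2.2))).Pairwise (· < ·) := by
    have hnd := PySem.Set.nodup_ofList ((PySem.List.sorted2 l (fun t => t.2.2) (fun t => t.2.1) false).map
      (fun t => t.2.2))
    have := (pvOfList_pairwise _ hle).and hnd
    exact this.imp (fun h => lt_of_le_of_ne h.1 h.2)
  exact (PySem.List.sorted_eq_of_perm_of_pairwise_lt _ _ (fun x => x) hperm hpw).symm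

-- B's pass over one run whose resource matches the current one
theorem pvBStep_run (r : List (String × String × String)) (k : String)
    (h : ∀ t ∈ r, t.2.2 = k) (body : List String) :
    r.foldl pvBStep (body, some k) = (body ++ r.map pvLine, some k) := by
  induction r generalizing body with
  | nil => simp
  | cons t r ih =>
    have ht := h t List.mem_cons_self
    have hstep : pvBStep (body, some k) t = (body ++ [pvLine t], some k) := by
      unfold pvBStep
      rw [ht]
      simp
    rw [List.foldl_cons, hstep, ih (fun u hu => h u (List.mem_cons_of_mem _ hu))]
    simp

-- B's pass over the concatenated runs
theorem pvBStep_runs (l : List (String × String × String)) (ks : List String)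
    (cur : Option String) (body : List String) (hnd : ks.Nodup)
    (hcur : ∀ k ∈ ks, cur ≠ some k) (hne : ∀ k ∈ ks, pvRun l k ≠ []) :
    (ks.flatMap (pvRun l)).foldl pvBStep (body, cur)
      = (body ++ pvEmit l cur ks, ks.foldl (fun _ k => some k) cur) := by
  induction ks generalizing cur body with
  | nil => simp [pvEmit]
  | cons k ks ih =>
    rcases List.nodup_cons.1 hnd with ⟨hk, hnd'⟩
    have hrn := hne k List.mem_cons_self
    rcases hr : pvRun l k with _ | ⟨t, rt⟩
    · exact absurd hr hrn
    have htk : t.2.2 = k := pvRun_mem (hr ▸ List.mem_cons_self)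
    have hnck : some k ≠ cur := fun e => hcur k List.mem_cons_self e.symm
    have hstep : pvBStep (body, cur) t
        = ((if cur = none then body else body ++ [""]) ++ [pvHdr k] ++ [pvLine t], some k) := by
      unfold pvBStep
      rw [htk]
      simp [hnck]
    have hrt : ∀ u ∈ rt, u.2.2 = k := fun u hu => pvRun_mem (hr ▸ List.mem_cons_of_mem t hu)
    rw [List.flatMap_cons, List.foldl_append, hr, List.foldl_cons, hstep, pvBStep_run rt k hrt,
      ih (some k) _ hnd'
        (fun k' hk' e => hk (by rw [Option.some.injEq] at e; exact e ▸ hk'))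
        (fun k' hk' => hne k' (List.mem_cons_of_mem _ hk'))]
    have hpre : (if cur = none then body else body ++ [""])
        = body ++ (if cur = none then [] else [""]) := by
      cases cur <;> simp
    simp [pvEmit, hr, hpre, List.append_assoc]

theorem pvEmit_some (l : List (String × String × String)) (ks : List String) (k0 : String) :
    pvEmit l (some k0) ks ++ [""] = [""] ++ ks.flatMap (pvBlock l) := by
  induction ks generalizing k0 with
  | nil => simp [pvEmit]
  | cons k ks ih => simp [pvEmit, pvBlock, ih, List.append_assoc]

theorem pvEmit_none (l : List (String × String × String)) (ks : List String) (h : ks ≠ []) :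
    pvEmit l none ks ++ [""] = ks.flatMap (pvBlock l) := by
  cases ks with
  | nil => exact absurd rfl h
  | cons k ks =>
    show ([] ++ pvHdr k :: (pvRun l k).map pvLine ++ pvEmit l (some k) ks) ++ [""]
      = (k :: ks).flatMap (pvBlock l)
    rw [List.nil_append, List.flatMap_cons]
    simp only [List.cons_append, List.append_assoc, pvEmit_some l ks k]
    simp [pvBlock, List.append_assoc]

-- ===== VERDICT (by name: the statement is the Claim_ definition above) =====
theorem generate_operations_index_spec : Claim_equal_generate_operations_index := by
  intro api_name l _
  unfold Spec_generate_operations_index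
  simp only [generate_operations_index, generate_operations_index_alt]
  apply congrArg (PySem.Str.join "\n")
  apply congrArg (· ++ pvFootLines api_name)
  -- A's side: dict items → sorted key map → flatMap of blocks
  rw [pvItems_grouped l, pvSorted_items l, pvA_mid l (pvKeys l) (pvHeadLines api_name)]
  -- B's side: the sorted list is the concatenation of its per-resource runs
  have hs2 : PySem.List.sorted2 l (fun t => t.2.2) (fun t => t.2.1) false
      = (pvKeys l).flatMap (pvRun l) := by
    have hc := pvClustered (PySem.List.sorted2 l (fun t => t.2.2) (fun t => t.2.1) false)
      (pvSorted2_pairwise l)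
    rw [pvKeys_of_sorted2 l] at hc
    rw [List.flatMap_congr (fun k _ => pvFilter_sorted2 l k)] at hc
    exact hc
  rw [hs2]
  rcases hks : pvKeys l with _ | ⟨k, ks⟩
  · simp
  · have hnd : (pvKeys l).Nodup :=
      (PySem.List.sorted_perm _ _ _).nodup_iff.2 (PySem.Set.nodup_ofList _)
    have hne : ∀ k' ∈ pvKeys l, pvRun l k' ≠ [] := by
      intro k' hk' hnil
      rw [pvRun, PySem.List.sorted_eq_nil_iff] at hnil
      rcases List.mem_map.1 ((PySem.Set.mem_ofList _ _).1
        ((PySem.List.mem_sorted _ _ _ _).1 hk')) with ⟨t, ht, hte⟩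
      have : t ∈ l.filter (fun u => u.2.2 == k') :=
        List.mem_filter.2 ⟨ht, beq_iff_eq.2 hte⟩
      rw [hnil] at this
      exact absurd this (List.not_mem_nil)
    rw [hks] at hnd hne
    rw [pvBStep_runs l (k :: ks) none (pvHeadLines api_name) hnd
      (fun _ _ e => by simp at e) hne]
    have hsnd : (k :: ks).foldl (fun _ k => some k) none ≠ none := pvFoldlLast_ne_none ks k
    rcases hv : (k :: ks).foldl (fun _ k => some k) (none : Option String) with _ | v
    · exact absurd hv hsnd
    rw [if_neg (by simp), List.append_assoc, pvEmit_none l (k :: ks) (List.cons_ne_nil k ks)]
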